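-- pv_equiv track=rewrite | github.com/jpfigueredo/ciencia-da-computacao | 5-Projeto_de_Bloco_Ciência_da_Computação[24E4_5]/projects/tp4_files/g3_graph.py | bfs
-- ===== SOURCE A (Python) =====
-- from collections import deque
--
-- def bfs(grafo, inicio):
--     visitados = set()
--     fila = deque([inicio])
--     ordem = []
--
--     visitados.add(inicio)
--
--     while fila:
--         no = fila.popleft()
--         ordem.append(no)
--         for vizinho in grafo.get(no, []):
--             if vizinho not in visitados:
--                 visitados.add(vizinho)
--                 fila.append(vizinho)
--
--     return ordem
-- ===== SOURCE B (Python) =====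
-- def bfs(grafo, inicio):
--     # Round-based BFS without a queue or visited set: repeatedly rescan the whole
--     # current order, collecting neighbors not yet listed, until a round adds nothing.
--     ordem = [inicio]
--     while True:
--         novos = []
--         for u in ordem:
--             for v in grafo.get(u, []):
--                 if v not in ordem and v not in novos:
--                     novos.append(v)
--         if not novos:
--             return ordem
--         ordem = ordem + novos
-- ===== Notes on version B (the rewrite author's own statement) =====
-- stated objective: alternative
-- what changed: Replaces the deque/visited-set BFS with a saturation-round algorithm: no queue and no set at all; each round rescans the whole order list, appends the neighbors not already listed (plain list membership), and stops when a round discovers nothing, which yields the same level-by-level enqueue order.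
import Mathlib
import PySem

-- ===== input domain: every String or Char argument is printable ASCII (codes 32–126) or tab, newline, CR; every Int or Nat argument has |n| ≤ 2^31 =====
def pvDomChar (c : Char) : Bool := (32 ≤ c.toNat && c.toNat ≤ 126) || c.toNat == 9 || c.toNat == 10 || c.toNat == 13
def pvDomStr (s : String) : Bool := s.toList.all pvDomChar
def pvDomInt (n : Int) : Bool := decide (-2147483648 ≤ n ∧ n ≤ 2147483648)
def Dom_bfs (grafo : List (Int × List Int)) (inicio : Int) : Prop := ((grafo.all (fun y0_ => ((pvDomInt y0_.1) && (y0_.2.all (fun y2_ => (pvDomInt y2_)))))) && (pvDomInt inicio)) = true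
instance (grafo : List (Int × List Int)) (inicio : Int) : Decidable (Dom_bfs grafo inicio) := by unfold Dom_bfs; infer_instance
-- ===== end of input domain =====

-- B replaces A's deque/visited-set BFS by queue-free saturation rounds over the whole order list
-- (plain list membership, no set); same return value, proved below.

-- Termination-measure support (cited by both ports' decreasing_by).
def pvUnvis (grafo : List (Int × List Int)) (vis : PySem.Set Int) : Nat :=
  ((PySem.List.dedup (grafo.flatMap Prod.snd)).filter (fun x => !(PySem.Set.contains vis x))).length

theorem pvFilter_length_drop (p q : Int → Bool) (v : Int) :
    ∀ (l : List Int), l.Nodup → v ∈ l → p v = true → q v = false →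
      (∀ x ∈ l, x ≠ v → p x = q x) →
      (l.filter q).length + 1 = (l.filter p).length := by
  intro l
  induction l with
  | nil => intro _ hv; cases hv
  | cons a t ih =>
    intro hnd hv hp hq hag
    rcases List.nodup_cons.mp hnd with ⟨hat, hndt⟩
    by_cases hav : a = v
    · subst hav
      have hfeq : t.filter p = t.filter q := by
        apply List.filter_congr
        intro x hx
        exact hag x (List.mem_cons_of_mem _ hx) (fun h => hat (h ▸ hx))
      rw [List.filter_cons, List.filter_cons, hp, hq, hfeq]
      simp
    · have hvt : v ∈ t := by
        rcases List.mem_cons.mp hv with h | h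
        · exact absurd h.symm hav
        · exact h
      have hpa : p a = q a := hag a (List.mem_cons_self) hav
      have ih' := ih hndt hvt hp hq (fun x hx hxv => hag x (List.mem_cons_of_mem _ hx) hxv)
      rw [List.filter_cons, List.filter_cons, ← hpa]
      by_cases hqa : p a = true
      · simp only [hqa, if_true, List.length_cons]
        omega
      · have hqa' : p a = false := by simpa using hqa
        simp only [hqa', Bool.false_eq_true, if_false]
        exact ih'

theorem pvUnvis_add (grafo : List (Int × List Int)) (vis : PySem.Set Int) (v : Int)
    (hv : v ∈ grafo.flatMap Prod.snd) (hnv : PySem.Set.contains vis v = false) :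
    pvUnvis grafo (PySem.Set.add vis v) + 1 = pvUnvis grafo vis := by
  unfold pvUnvis
  have hv' : v ∉ vis := fun h => by
    rw [(PySem.Set.contains_iff vis v).mpr h] at hnv; cases hnv
  refine pvFilter_length_drop (fun x => !(PySem.Set.contains vis x))
      (fun x => !(PySem.Set.contains (PySem.Set.add vis v) x)) v _
      (PySem.List.nodup_dedup _) ((PySem.List.mem_dedup _ _).mpr hv) (by simp [hv']) ?_ ?_
  · simp [PySem.Set.add, hv']
  · intro x hx hxv
    simp [PySem.Set.add, hv', hxv]

theorem pvEdge_mem (grafo : List (Int × List Int)) (no : Int) :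
    ∀ v ∈ (PySem.Dict.mk grafo).getD no [], v ∈ grafo.flatMap Prod.snd := by
  induction grafo with
  | nil => intro v hv; simp [PySem.Dict.getD, PySem.Dict.get?] at hv
  | cons kl rest ih =>
    intro v hv
    rw [PySem.Dict.getD_eq_get?_getD, PySem.Dict.get?_mk_cons] at hv
    by_cases hk : kl.1 == no
    · simp [hk] at hv
      exact List.mem_flatMap.mpr ⟨kl, List.mem_cons_self, hv⟩
    · simp [hk] at hv
      rw [← PySem.Dict.getD_eq_get?_getD] at hv
      rcases List.mem_flatMap.mp (ih v hv) with ⟨l, hl, hvl⟩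
      exact List.mem_flatMap.mpr ⟨l, List.mem_cons_of_mem _ hl, hvl⟩

theorem pvFold_measure (grafo : List (Int × List Int)) :
    ∀ (nbrs : List Int), (∀ v ∈ nbrs, v ∈ grafo.flatMap Prod.snd) →
      ∀ (vis : PySem.Set Int) (acc : List Int),
        pvUnvis grafo (nbrs.foldl (fun p viz => if PySem.Set.contains p.1 viz then p else (PySem.Set.add p.1 viz, p.2 ++ [viz])) (vis, acc)).1
          + (nbrs.foldl (fun p viz => if PySem.Set.contains p.1 viz then p else (PySem.Set.add p.1 viz, p.2 ++ [viz])) (vis, acc)).2.length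
          = pvUnvis grafo vis + acc.length := by
  intro nbrs
  induction nbrs with
  | nil => intro _ vis acc; rfl
  | cons viz t ih =>
    intro h vis acc
    have ht : ∀ v ∈ t, v ∈ grafo.flatMap Prod.snd := fun v hv => h v (List.mem_cons_of_mem _ hv)
    by_cases hc : PySem.Set.contains vis viz = true
    · simp only [List.foldl_cons, hc, if_true]
      exact ih ht vis acc
    · have hc' : PySem.Set.contains vis viz = false := by simpa using hc
      simp only [List.foldl_cons, hc', Bool.false_eq_true, if_false]
      have h2 := ih ht (PySem.Set.add vis viz) (acc ++ [viz])
      have hdrop := pvUnvis_add grafo vis viz (h viz List.mem_cons_self) hc'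
      simp only [List.length_append, List.length_cons, List.length_nil] at h2 ⊢
      omega

-- ===== PORT A =====
def bfsLoopA (grafo : List (Int × List Int)) (vis : PySem.Set Int) (fila ordem : List Int) : List Int :=
  match fila with
  | [] => ordem
  | no :: rest =>
    let s := ((PySem.Dict.mk grafo).getD no []).foldl
      (fun p viz => if PySem.Set.contains p.1 viz then p else (PySem.Set.add p.1 viz, p.2 ++ [viz]))
      (vis, rest)
    bfsLoopA grafo s.1 s.2 (ordem ++ [no])
termination_by pvUnvis grafo vis + fila.length
decreasing_by
  simp only [dite_eq_ite]
  have h := pvFold_measure grafo ((PySem.Dict.mk grafo).getD no []) (pvEdge_mem grafo no) vis rest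
  simp only [List.length_cons]
  omega

def bfs (grafo : List (Int × List Int)) (inicio : Int) : List Int :=
  bfsLoopA grafo (PySem.Set.add PySem.Set.empty inicio) [inicio] []

-- ===== PORT B =====
-- One round of Source B: scan all of ordem, collect neighbors listed neither in ordem nor in novos yet.
def pvLayer (grafo : List (Int × List Int)) (ordem : List Int) : List Int :=
  ordem.foldl (fun novos u =>
    ((PySem.Dict.mk grafo).getD u []).foldl
      (fun acc v => if v ∉ ordem ∧ v ∉ acc then acc ++ [v] else acc) novos) []

-- B's termination measure: potential nodes not yet listed.
def pvUnvisL (grafo : List (Int × List Int)) (ordem : List Int) : Nat :=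
  ((PySem.List.dedup (grafo.flatMap Prod.snd)).filter (fun x => decide (x ∉ ordem))).length

theorem pvFilter_mono (p q : Int → Bool) (himp : ∀ x, q x = true → p x = true) :
    ∀ (l : List Int), (l.filter q).length ≤ (l.filter p).length := by
  intro l
  induction l with
  | nil => simp
  | cons a t ih =>
    rw [List.filter_cons, List.filter_cons]
    by_cases hq : q a = true
    · rw [hq, himp a hq]; simpa using ih
    · have hq' : q a = false := by simpa using hq
      rw [hq']
      by_cases hp : p a = true
      · rw [hp]; simp only [Bool.false_eq_true, if_false, if_true, List.length_cons]; omega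
      · have hp' : p a = false := by simpa using hp
        rw [hp']; simpa using ih

theorem pvFilter_strict (p q : Int → Bool) (himp : ∀ x, q x = true → p x = true) (v : Int) :
    ∀ (l : List Int), v ∈ l → p v = true → q v = false →
      (l.filter q).length < (l.filter p).length := by
  intro l
  induction l with
  | nil => intro hv; cases hv
  | cons a t ih =>
    intro hv hp hq
    rw [List.filter_cons, List.filter_cons]
    by_cases hav : a = v
    · subst hav
      rw [hp, hq]
      simp only [Bool.false_eq_true, if_false, if_true, List.length_cons]
      have := pvFilter_mono p q himp t
      omega
    · have hvt : v ∈ t := by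
        rcases List.mem_cons.mp hv with h | h
        · exact absurd h.symm hav
        · exact h
      have := ih hvt hp hq
      by_cases hq' : q a = true
      · rw [hq', himp a hq']; simpa using this
      · have hq'' : q a = false := by simpa using hq'
        rw [hq'']
        by_cases hp' : p a = true
        · rw [hp']; simp only [Bool.false_eq_true, if_false, if_true, List.length_cons]; omega
        · have hp'' : p a = false := by simpa using hp'
          rw [hp'']; simpa using this

theorem pvLayer_props (grafo : List (Int × List Int)) (ordem : List Int) :
    ∀ v ∈ pvLayer grafo ordem, v ∈ grafo.flatMap Prod.snd ∧ v ∉ ordem := by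
  unfold pvLayer
  suffices h : ∀ (us : List Int) (acc : List Int),
      (∀ v ∈ acc, v ∈ grafo.flatMap Prod.snd ∧ v ∉ ordem) →
      ∀ v ∈ us.foldl (fun novos u =>
        ((PySem.Dict.mk grafo).getD u []).foldl
          (fun acc v => if v ∉ ordem ∧ v ∉ acc then acc ++ [v] else acc) novos) acc,
        v ∈ grafo.flatMap Prod.snd ∧ v ∉ ordem by
    exact h ordem [] (by simp)
  intro us
  induction us with
  | nil => intro acc hacc v hv; exact hacc v hv
  | cons u t ih =>
    intro acc hacc v hv
    refine ih _ ?_ v hv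
    have hinner : ∀ (nbrs : List Int), (∀ w ∈ nbrs, w ∈ grafo.flatMap Prod.snd) →
        ∀ (a : List Int), (∀ w ∈ a, w ∈ grafo.flatMap Prod.snd ∧ w ∉ ordem) →
        ∀ w ∈ nbrs.foldl (fun acc v => if v ∉ ordem ∧ v ∉ acc then acc ++ [v] else acc) a,
          w ∈ grafo.flatMap Prod.snd ∧ w ∉ ordem := by
      intro nbrs
      induction nbrs with
      | nil => intro _ a ha w hw; exact ha w hw
      | cons b tb ihb =>
        intro hn a ha w hw
        refine ihb (fun w hw => hn w (List.mem_cons_of_mem _ hw)) _ ?_ w hw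
        intro x hx
        by_cases hb : b ∉ ordem ∧ b ∉ a
        · simp only [hb, and_self] at hx ⊢
          rcases List.mem_append.mp hx with h | h
          · exact ha x h
          · rcases List.mem_singleton.mp h with rfl
            exact ⟨hn x List.mem_cons_self, hb.1⟩
        · simp only [hb, if_false] at hx ⊢
          exact ha x hx
    exact hinner _ (pvEdge_mem grafo u) acc hacc

theorem pvUnvisL_dec (grafo : List (Int × List Int)) (ordem : List Int)
    (h : ¬ (pvLayer grafo ordem).isEmpty = true) :
    pvUnvisL grafo (ordem ++ pvLayer grafo ordem) < pvUnvisL grafo ordem := by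
  rcases hne : pvLayer grafo ordem with _ | ⟨v, t⟩
  · rw [hne] at h; simp at h
  · have hv : v ∈ pvLayer grafo ordem := by rw [hne]; exact List.mem_cons_self
    rcases pvLayer_props grafo ordem v hv with ⟨hfm, hno⟩
    unfold pvUnvisL
    refine pvFilter_strict _ _ ?_ v _ ((PySem.List.mem_dedup _ _).mpr hfm) (by simpa using hno) ?_
    · intro x hx
      simp only [decide_eq_true_eq] at hx ⊢
      intro hmem; exact hx (List.mem_append_left _ hmem)
    · simp only [decide_eq_false_iff_not, not_not]
      exact List.mem_append_right _ (hne ▸ hv)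

def bfsLoopB (grafo : List (Int × List Int)) (ordem : List Int) : List Int :=
  let novos := pvLayer grafo ordem
  if novos.isEmpty then ordem
  else bfsLoopB grafo (ordem ++ novos)
termination_by pvUnvisL grafo ordem
decreasing_by
  exact pvUnvisL_dec grafo ordem (by assumption)

def bfs_alt (grafo : List (Int × List Int)) (inicio : Int) : List Int :=
  bfsLoopB grafo [inicio]

-- ===== PRECONDITION & SPEC =====
def Spec_bfs (grafo : List (Int × List Int)) (inicio : Int) (out : List Int) : Prop := out = bfs_alt grafo inicio
instance (grafo : List (Int × List Int)) (inicio : Int) (out : List Int) : Decidable (Spec_bfs grafo inicio out) := by unfold Spec_bfs; infer_instance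

-- ===== CLAIM (what is proved, stated in full; the proofs are below) =====
def Claim_equal_bfs : Prop := ∀ (grafo : List (Int × List Int)) (inicio : Int), Dom_bfs grafo inicio → Spec_bfs grafo inicio (bfs grafo inicio)

-- ===== LEMMAS AND PROOFS =====
def pvExpandN (grafo : List (Int × List Int)) (vis : PySem.Set Int) (no : Int) : PySem.Set Int × List Int :=
  ((PySem.Dict.mk grafo).getD no []).foldl
    (fun p viz => if PySem.Set.contains p.1 viz then p else (PySem.Set.add p.1 viz, p.2 ++ [viz]))
    (vis, [])

def pvExpandF (grafo : List (Int × List Int)) (vis : PySem.Set Int) (F : List Int) : PySem.Set Int × List Int :=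
  F.foldl (fun p no => ((pvExpandN grafo p.1 no).1, p.2 ++ (pvExpandN grafo p.1 no).2)) (vis, [])

theorem pvFold_acc (nbrs : List Int) :
    ∀ (vis : PySem.Set Int) (acc : List Int),
      nbrs.foldl (fun p viz => if PySem.Set.contains p.1 viz then p else (PySem.Set.add p.1 viz, p.2 ++ [viz])) (vis, acc)
        = ((nbrs.foldl (fun p viz => if PySem.Set.contains p.1 viz then p else (PySem.Set.add p.1 viz, p.2 ++ [viz])) (vis, [])).1,
           acc ++ (nbrs.foldl (fun p viz => if PySem.Set.contains p.1 viz then p else (PySem.Set.add p.1 viz, p.2 ++ [viz])) (vis, [])).2) := by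
  induction nbrs with
  | nil => intro vis acc; simp
  | cons viz t ih =>
    intro vis acc
    by_cases hc : PySem.Set.contains vis viz = true
    · simp only [List.foldl_cons, hc, if_true]
      exact ih vis acc
    · have hc' : PySem.Set.contains vis viz = false := by simpa using hc
      simp only [List.foldl_cons, hc', Bool.false_eq_true, if_false]
      rw [ih (PySem.Set.add vis viz) (acc ++ [viz]), ih (PySem.Set.add vis viz) ([] ++ [viz])]
      simp

theorem pvExpandF_acc (grafo : List (Int × List Int)) :
    ∀ (F : List Int) (vis : PySem.Set Int) (acc : List Int),
      F.foldl (fun p no => ((pvExpandN grafo p.1 no).1, p.2 ++ (pvExpandN grafo p.1 no).2)) (vis, acc)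
        = ((pvExpandF grafo vis F).1, acc ++ (pvExpandF grafo vis F).2) := by
  intro F
  induction F with
  | nil => intro vis acc; simp [pvExpandF]
  | cons no t ih =>
    intro vis acc
    simp only [pvExpandF, List.foldl_cons]
    rw [ih (pvExpandN grafo vis no).1 (acc ++ (pvExpandN grafo vis no).2),
        ih (pvExpandN grafo vis no).1 ([] ++ (pvExpandN grafo vis no).2)]
    simp [pvExpandF]

theorem pvExpandF_cons (grafo : List (Int × List Int)) (vis : PySem.Set Int) (no : Int) (t : List Int) :
    pvExpandF grafo vis (no :: t)
      = ((pvExpandF grafo (pvExpandN grafo vis no).1 t).1,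
         (pvExpandN grafo vis no).2 ++ (pvExpandF grafo (pvExpandN grafo vis no).1 t).2) := by
  simp only [pvExpandF, List.foldl_cons]
  rw [pvExpandF_acc]
  simp [pvExpandF]

theorem pvQueue_split (grafo : List (Int × List Int)) :
    ∀ (F : List Int) (vis : PySem.Set Int) (G ordem : List Int),
      bfsLoopA grafo vis (F ++ G) ordem
        = bfsLoopA grafo (pvExpandF grafo vis F).1 (G ++ (pvExpandF grafo vis F).2) (ordem ++ F) := by
  intro F
  induction F with
  | nil => intro vis G ordem; simp [pvExpandF]
  | cons no t ih =>
    intro vis G ordem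
    rw [List.cons_append, bfsLoopA]
    rw [pvFold_acc]
    rw [show (((PySem.Dict.mk grafo).getD no []).foldl
        (fun p viz => if PySem.Set.contains p.1 viz then p else (PySem.Set.add p.1 viz, p.2 ++ [viz])) (vis, []))
        = pvExpandN grafo vis no from rfl]
    rw [show (t ++ G) ++ (pvExpandN grafo vis no).2 = t ++ (G ++ (pvExpandN grafo vis no).2) by simp]
    rw [ih (pvExpandN grafo vis no).1 (G ++ (pvExpandN grafo vis no).2) (ordem ++ [no])]
    rw [pvExpandF_cons]
    simp

theorem pvExpandF_measure (grafo : List (Int × List Int)) :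
    ∀ (F : List Int) (vis : PySem.Set Int),
      pvUnvis grafo (pvExpandF grafo vis F).1 + (pvExpandF grafo vis F).2.length
        = pvUnvis grafo vis := by
  intro F
  induction F with
  | nil => intro vis; rfl
  | cons no t ih =>
    intro vis
    rw [pvExpandF_cons]
    have h1 := pvFold_measure grafo ((PySem.Dict.mk grafo).getD no []) (pvEdge_mem grafo no) vis []
    have h2 := ih (pvExpandN grafo vis no).1
    simp only [pvExpandN] at h1 h2 ⊢
    simp only [List.length_append, List.length_nil] at h1 h2 ⊢
    omega

-- Intermediate level-synchronous loop (proof device bridging A's queue to B's rounds).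
def pvLoopC (grafo : List (Int × List Int)) (vis : PySem.Set Int) (F ordem : List Int) : List Int :=
  if F.isEmpty then ordem
  else pvLoopC grafo (pvExpandF grafo vis F).1 (pvExpandF grafo vis F).2 (ordem ++ F)
termination_by pvUnvis grafo vis + F.length
decreasing_by
  have h := pvExpandF_measure grafo F vis
  have : 0 < F.length := by
    cases F with
    | nil => simp at *
    | cons a t => simp
  omega

theorem pvAC (grafo : List (Int × List Int)) :
    ∀ (vis : PySem.Set Int) (F ordem : List Int),
      bfsLoopA grafo vis F ordem = pvLoopC grafo vis F ordem := by
  intro vis F ordem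
  induction vis, F, ordem using pvLoopC.induct grafo with
  | case1 vis F ordem hemp =>
    rw [pvLoopC, if_pos hemp, List.isEmpty_iff.mp hemp, bfsLoopA]
  | case2 vis F ordem hemp ih =>
    rw [pvLoopC, if_neg hemp]
    have hsplit := pvQueue_split grafo F vis [] ordem
    simp only [List.append_nil, List.nil_append] at hsplit
    rw [hsplit]
    exact ih

theorem pvMemFoldlAdd (l : List Int) : ∀ (s : PySem.Set Int) (x : Int), x ∈ s → x ∈ l.foldl PySem.Set.add s := by
  induction l with
  | nil => intro s x hx; exact hx
  | cons a t ih =>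
    intro s x hx
    exact ih _ x ((PySem.Set.mem_add _ _ _).mpr (Or.inl hx))

theorem pvExpandN_set (grafo : List (Int × List Int)) (vis : PySem.Set Int) (no : Int) :
    (pvExpandN grafo vis no).1 = (pvExpandN grafo vis no).2.foldl PySem.Set.add vis := by
  unfold pvExpandN
  generalize (PySem.Dict.mk grafo).getD no [] = nbrs
  induction nbrs generalizing vis with
  | nil => simp
  | cons viz t ih =>
    by_cases hc : PySem.Set.contains vis viz = true
    · simp only [List.foldl_cons, hc, if_true]
      exact ih vis
    · have hc' : PySem.Set.contains vis viz = false := by simpa using hc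
      have hnm : viz ∉ vis := fun h => by
        rw [(PySem.Set.contains_iff vis viz).mpr h] at hc'; cases hc'
      simp only [List.foldl_cons, hc', Bool.false_eq_true, if_false]
      rw [pvFold_acc]
      have := ih (PySem.Set.add vis viz)
      simp only [List.nil_append] at this ⊢
      exact this

theorem pvExpandF_set (grafo : List (Int × List Int)) :
    ∀ (F : List Int) (vis : PySem.Set Int),
      (pvExpandF grafo vis F).1 = (pvExpandF grafo vis F).2.foldl PySem.Set.add vis := by
  intro F
  induction F with
  | nil => intro vis; simp [pvExpandF]
  | cons no t ih =>
    intro vis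
    rw [pvExpandF_cons]
    simp only [List.foldl_append]
    rw [← pvExpandN_set, ih]

theorem pvExpandN_covers (grafo : List (Int × List Int)) (vis : PySem.Set Int) (no : Int) :
    ∀ v ∈ (PySem.Dict.mk grafo).getD no [], v ∈ (pvExpandN grafo vis no).1 := by
  unfold pvExpandN
  generalize (PySem.Dict.mk grafo).getD no [] = nbrs
  induction nbrs generalizing vis with
  | nil => intro v hv; cases hv
  | cons viz t ih =>
    intro v hv
    by_cases hc : PySem.Set.contains vis viz = true
    · simp only [List.foldl_cons, hc, if_true]
      rcases List.mem_cons.mp hv with rfl | hvt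
      · -- v already in vis: stays in via the set-evolution view
        have hvin : v ∈ vis := (PySem.Set.contains_iff vis v).mp hc
        have hset : (List.foldl (fun p viz => if PySem.Set.contains p.1 viz then p else (PySem.Set.add p.1 viz, p.2 ++ [viz])) (vis, []) t).1
            = (List.foldl (fun p viz => if PySem.Set.contains p.1 viz then p else (PySem.Set.add p.1 viz, p.2 ++ [viz])) (vis, []) t).2.foldl PySem.Set.add vis := by
          have h := pvExpandN_set (grafo := [((0:Int), t)]) (vis := vis) (no := 0)
          simpa [pvExpandN, PySem.Dict.getD, PySem.Dict.get?] using h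
        rw [hset]
        exact pvMemFoldlAdd _ vis v hvin
      · exact ih vis v hvt
    · have hc' : PySem.Set.contains vis viz = false := by simpa using hc
      simp only [List.foldl_cons, hc', Bool.false_eq_true, if_false]
      rw [pvFold_acc]
      rcases List.mem_cons.mp hv with rfl | hvt
      · have hvin : v ∈ PySem.Set.add vis v := (PySem.Set.mem_add _ _ _).mpr (Or.inr rfl)
        have hset : (List.foldl (fun p viz => if PySem.Set.contains p.1 viz then p else (PySem.Set.add p.1 viz, p.2 ++ [viz])) (PySem.Set.add vis v, []) t).1
            = (List.foldl (fun p viz => if PySem.Set.contains p.1 viz then p else (PySem.Set.add p.1 viz, p.2 ++ [viz])) (PySem.Set.add vis v, []) t).2.foldl PySem.Set.add (PySem.Set.add vis v) := by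
          have h := pvExpandN_set (grafo := [((0:Int), t)]) (vis := PySem.Set.add vis v) (no := 0)
          simpa [pvExpandN, PySem.Dict.getD, PySem.Dict.get?] using h
        rw [hset]
        exact pvMemFoldlAdd _ _ v hvin
      · exact ih (PySem.Set.add vis viz) v hvt

theorem pvExpandF_covers (grafo : List (Int × List Int)) :
    ∀ (F : List Int) (vis : PySem.Set Int), ∀ u ∈ F, ∀ v ∈ (PySem.Dict.mk grafo).getD u [], v ∈ (pvExpandF grafo vis F).1 := by
  intro F
  induction F with
  | nil => intro vis u hu; cases hu
  | cons no t ih =>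
    intro vis u hu v hv
    rw [pvExpandF_cons]
    rcases List.mem_cons.mp hu with rfl | hut
    · have h1 : v ∈ (pvExpandN grafo vis u).1 := pvExpandN_covers grafo vis u v hv
      rw [pvExpandF_set]
      exact pvMemFoldlAdd _ _ v h1
    · exact ih (pvExpandN grafo vis no).1 u hut v hv

theorem pvExpandN_closed (grafo : List (Int × List Int)) (vis : PySem.Set Int) (no : Int)
    (h : ∀ v ∈ (PySem.Dict.mk grafo).getD no [], v ∈ vis) :
    pvExpandN grafo vis no = (vis, []) := by
  unfold pvExpandN
  revert h
  generalize (PySem.Dict.mk grafo).getD no [] = nbrs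
  induction nbrs with
  | nil => intro _; rfl
  | cons viz t ih =>
    intro h
    have hc : PySem.Set.contains vis viz = true :=
      (PySem.Set.contains_iff vis viz).mpr (h viz List.mem_cons_self)
    simp only [List.foldl_cons, hc, if_true]
    exact ih (fun v hv => h v (List.mem_cons_of_mem _ hv))

theorem pvExpandF_skip (grafo : List (Int × List Int)) :
    ∀ (O : List Int) (F : List Int) (vis : PySem.Set Int),
      (∀ u ∈ O, ∀ v ∈ (PySem.Dict.mk grafo).getD u [], v ∈ vis) →
      pvExpandF grafo vis (O ++ F) = pvExpandF grafo vis F := by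
  intro O
  induction O with
  | nil => intro F vis _; rfl
  | cons u t ih =>
    intro F vis h
    rw [List.cons_append, pvExpandF_cons, pvExpandN_closed grafo vis u (h u List.mem_cons_self)]
    have := ih F vis (fun w hw => h w (List.mem_cons_of_mem _ hw))
    simp [this]

theorem pvInnerK (L : List Int) (nbrs : List Int) :
    ∀ (s : PySem.Set Int) (acc : List Int),
      (∀ x : Int, x ∈ s ↔ (x ∈ L ∨ x ∈ acc)) →
      ((nbrs.foldl (fun p viz => if PySem.Set.contains p.1 viz then p else (PySem.Set.add p.1 viz, p.2 ++ [viz])) (s, acc)).2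
          = nbrs.foldl (fun acc v => if v ∉ L ∧ v ∉ acc then acc ++ [v] else acc) acc)
      ∧ (∀ x : Int, x ∈ (nbrs.foldl (fun p viz => if PySem.Set.contains p.1 viz then p else (PySem.Set.add p.1 viz, p.2 ++ [viz])) (s, acc)).1
          ↔ (x ∈ L ∨ x ∈ (nbrs.foldl (fun p viz => if PySem.Set.contains p.1 viz then p else (PySem.Set.add p.1 viz, p.2 ++ [viz])) (s, acc)).2)) := by
  induction nbrs with
  | nil => intro s acc hR; exact ⟨rfl, hR⟩
  | cons v t ih =>
    intro s acc hR
    by_cases hm : v ∈ L ∨ v ∈ acc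
    · have hc : PySem.Set.contains s v = true :=
        (PySem.Set.contains_iff s v).mpr ((hR v).mpr hm)
      have hcond : ¬ (v ∉ L ∧ v ∉ acc) := by tauto
      simp only [List.foldl_cons, hc, if_true, hcond, if_false]
      exact ih s acc hR
    · rw [not_or] at hm
      have hns : v ∉ s := fun h => hm.1 (((hR v).mp h).resolve_right hm.2)
      have hc : PySem.Set.contains s v = false := by
        by_contra h
        exact hns ((PySem.Set.contains_iff s v).mp (by simpa using h))
      have hcond : v ∉ L ∧ v ∉ acc := hm
      simp only [List.foldl_cons, hc, Bool.false_eq_true, if_false, hcond, and_self]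
      refine ih (PySem.Set.add s v) (acc ++ [v]) ?_
      intro x
      rw [PySem.Set.mem_add]
      constructor
      · rintro (h | rfl)
        · rcases (hR x).mp h with h' | h'
          · exact Or.inl h'
          · exact Or.inr (List.mem_append_left _ h')
        · exact Or.inr (List.mem_append_right _ (List.mem_singleton.mpr rfl))
      · rintro (h | h)
        · exact Or.inl ((hR x).mpr (Or.inl h))
        · rcases List.mem_append.mp h with h' | h'
          · exact Or.inl ((hR x).mpr (Or.inr h'))
          · exact Or.inr (List.mem_singleton.mp h')

theorem pvOuterK (grafo : List (Int × List Int)) (L : List Int) :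
    ∀ (us : List Int) (s : PySem.Set Int) (acc : List Int),
      (∀ x : Int, x ∈ s ↔ (x ∈ L ∨ x ∈ acc)) →
      (us.foldl (fun p no => ((pvExpandN grafo p.1 no).1, p.2 ++ (pvExpandN grafo p.1 no).2)) (s, acc)).2
        = us.foldl (fun novos u =>
            ((PySem.Dict.mk grafo).getD u []).foldl
              (fun acc v => if v ∉ L ∧ v ∉ acc then acc ++ [v] else acc) novos) acc := by
  intro us
  induction us with
  | nil => intro s acc _; rfl
  | cons u t ih =>
    intro s acc hR
    simp only [List.foldl_cons]
    have hstep : ((pvExpandN grafo s u).1, acc ++ (pvExpandN grafo s u).2)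
        = ((PySem.Dict.mk grafo).getD u []).foldl
            (fun p viz => if PySem.Set.contains p.1 viz then p else (PySem.Set.add p.1 viz, p.2 ++ [viz])) (s, acc) := by
      rw [pvFold_acc]; rfl
    rcases pvInnerK L ((PySem.Dict.mk grafo).getD u []) s acc hR with ⟨h2, hRnew⟩
    rw [hstep]
    have := ih (((PySem.Dict.mk grafo).getD u []).foldl
        (fun p viz => if PySem.Set.contains p.1 viz then p else (PySem.Set.add p.1 viz, p.2 ++ [viz])) (s, acc)).1
      (((PySem.Dict.mk grafo).getD u []).foldl
        (fun p viz => if PySem.Set.contains p.1 viz then p else (PySem.Set.add p.1 viz, p.2 ++ [viz])) (s, acc)).2 hRnew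
    rw [this, h2]

theorem pvLayer_char (grafo : List (Int × List Int)) (L : List Int) :
    pvLayer grafo L = (pvExpandF grafo (PySem.Set.ofList L) L).2 := by
  unfold pvLayer pvExpandF
  refine (pvOuterK grafo L L (PySem.Set.ofList L) [] ?_).symm
  intro x
  simp [PySem.Set.mem_ofList]

theorem pvCB (grafo : List (Int × List Int)) :
    ∀ (vis : PySem.Set Int) (F O : List Int),
      vis = PySem.Set.ofList (O ++ F) →
      (∀ u ∈ O, ∀ v ∈ (PySem.Dict.mk grafo).getD u [], v ∈ O ++ F) →
      pvLoopC grafo vis F O = bfsLoopB grafo (O ++ F) := by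
  intro vis F O
  induction vis, F, O using pvLoopC.induct grafo with
  | case1 vis F O hemp =>
    intro hvis hcl
    rw [pvLoopC, if_pos hemp]
    have hF : F = [] := List.isEmpty_iff.mp hemp
    subst hF
    rw [List.append_nil] at hcl ⊢
    have hcl' : ∀ u ∈ O, ∀ v ∈ (PySem.Dict.mk grafo).getD u [], v ∈ PySem.Set.ofList O :=
      fun u hu v hv => (PySem.Set.mem_ofList _ _).mpr (hcl u hu v hv)
    have hlay : pvLayer grafo O = [] := by
      rw [pvLayer_char]
      have h1 := pvExpandF_skip grafo O [] (PySem.Set.ofList O) hcl'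
      rw [List.append_nil] at h1
      rw [h1]
      rfl
    rw [bfsLoopB]
    simp [hlay]
  | case2 vis F O hemp ih =>
    intro hvis hcl
    have hclS : ∀ u ∈ O, ∀ v ∈ (PySem.Dict.mk grafo).getD u [], v ∈ vis := by
      intro u hu v hv
      rw [hvis]
      exact (PySem.Set.mem_ofList _ _).mpr (hcl u hu v hv)
    have hlay : pvLayer grafo (O ++ F) = (pvExpandF grafo vis F).2 := by
      rw [pvLayer_char, ← hvis, pvExpandF_skip grafo O F vis hclS]
    have hofl : ∀ (L M : List Int), PySem.Set.ofList (L ++ M) = M.foldl PySem.Set.add (PySem.Set.ofList L) := by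
      intro L M
      rw [PySem.Set.ofList_eq_foldl, PySem.Set.ofList_eq_foldl, List.foldl_append]
    have hset : (pvExpandF grafo vis F).1 = PySem.Set.ofList ((O ++ F) ++ (pvExpandF grafo vis F).2) := by
      rw [pvExpandF_set, hofl, ← hvis]
    have hclNew : ∀ u ∈ O ++ F, ∀ v ∈ (PySem.Dict.mk grafo).getD u [], v ∈ (O ++ F) ++ (pvExpandF grafo vis F).2 := by
      intro u hu v hv
      rcases List.mem_append.mp hu with h | h
      · exact List.mem_append_left _ (hcl u h v hv)
      · have hm := pvExpandF_covers grafo F vis u h v hv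
        rw [hset] at hm
        exact (PySem.Set.mem_ofList _ _).mp hm
    rw [pvLoopC, if_neg hemp]
    rw [ih hset hclNew]
    conv_rhs => rw [bfsLoopB]
    simp only [hlay]
    by_cases hF' : (pvExpandF grafo vis F).2.isEmpty = true
    · rw [if_pos hF']
      have hnil : (pvExpandF grafo vis F).2 = [] := List.isEmpty_iff.mp hF'
      rw [hnil, List.append_nil, bfsLoopB]
      simp [hlay, hnil]
    · rw [if_neg hF']

-- ===== VERDICT (by name: the statement is the Claim_ definition above) =====
theorem bfs_spec : Claim_equal_bfs := by
  intro grafo inicio _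
  unfold Spec_bfs bfs bfs_alt
  rw [pvAC]
  have h := pvCB grafo (PySem.Set.ofList [inicio]) [inicio] [] rfl (by simp)
  simpa using h
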